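-- pv_equiv track=rewrite | github.com/algo4sik2/CoTe | Programmers/2022/01/19/hchang.py | solution
-- ===== SOURCE A (Python) =====
-- def solution(n):
--     count = 0
--     answer = ''
--     for i in range(n):
--         count += 1
--         if n > 3**count:
--             n -= 3**count
--         else: break
--     # dfs(count)
--     answer = ''
--     for i in range(count,0,-1):
--         if n > (3**(i-1))*2:
--             answer += '4'
--             n -= (3**(i-1))*2
--         elif n > 3**(i-1):
--             answer += '2'
--             n -= 3**(i-1)
--         else: answer += '1'
--     return answer
-- ===== SOURCE B (Python) =====
-- def solution(n):
--     s = ''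
--     while n > 0:
--         n, r = divmod(n, 3)
--         if r == 0:
--             n -= 1
--             s = '4' + s
--         else:
--             s = str(r) + s
--     return s
-- ===== Notes on version B (the rewrite author's own statement) =====
-- stated objective: idiomatic
-- what changed: A's two passes (count the digit length by subtracting powers of 3, then greedily emit digits most-significant-first by comparing the residual against 3^(i-1) and 2*3^(i-1)) are replaced by a single least-significant-digit-first loop: repeated divmod by 3 with a borrow (remainder 0 emits '4' and decrements the quotient), prepending each digit.
import Mathlib
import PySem

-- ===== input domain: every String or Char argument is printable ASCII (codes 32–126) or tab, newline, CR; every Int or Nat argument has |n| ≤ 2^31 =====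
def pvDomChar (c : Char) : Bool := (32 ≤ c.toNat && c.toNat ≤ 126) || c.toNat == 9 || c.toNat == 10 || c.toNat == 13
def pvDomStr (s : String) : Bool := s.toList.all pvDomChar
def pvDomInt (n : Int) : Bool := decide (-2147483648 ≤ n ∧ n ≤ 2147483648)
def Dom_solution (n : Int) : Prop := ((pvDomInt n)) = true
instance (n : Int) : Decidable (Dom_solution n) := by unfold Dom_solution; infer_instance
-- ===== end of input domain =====

-- B replaces A's two passes (count digits by subtracting powers of 3, then greedy MSB fill)
-- with one least-significant-digit-first repeated divmod with borrow; same return value, alternative algorithm.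

-- ===== PORT A =====
-- first loop: for i in range(n): count += 1; if n > 3**count: n -= 3**count else break
-- (fuel = number of remaining range(n) iterations; count tracked as Nat since it only counts up from 0)
def solnLoop1 : Nat → Nat → Int → (Nat × Int)
  | 0, c, m => (c, m)
  | f + 1, c, m =>
      if m > 3 ^ (c + 1) then solnLoop1 f (c + 1) (m - 3 ^ (c + 1)) else (c + 1, m)

-- second loop: for i in range(count, 0, -1), accumulating answer left to right
def solnLoop2 : Nat → Int → String → String
  | 0, _, acc => acc
  | i + 1, m, acc =>
      if m > 3 ^ i * 2 then solnLoop2 i (m - 3 ^ i * 2) (acc ++ "4")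
      else if m > 3 ^ i then solnLoop2 i (m - 3 ^ i) (acc ++ "2")
      else solnLoop2 i m (acc ++ "1")

def solution (n : Int) : String :=
  let p := solnLoop1 n.toNat 0 n
  solnLoop2 p.1 p.2 ""

-- ===== PORT B =====
-- while n > 0: n, r = divmod(n, 3); if r == 0: n -= 1; s = '4' + s else: s = str(r) + s
def altLoop (n : Int) (s : String) : String :=
  if 0 < n then
    let q := PySem.Int.floordiv n 3
    let r := PySem.Int.mod n 3
    if r = 0 then altLoop (q - 1) ("4" ++ s)
    else altLoop q (PySem.Int.toStr r ++ s)
  else s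
termination_by n.toNat
decreasing_by
  · have hq : PySem.Int.floordiv n 3 = n / 3 := PySem.Int.floordiv_eq_ediv_of_pos (by omega)
    omega
  · have hq : PySem.Int.floordiv n 3 = n / 3 := PySem.Int.floordiv_eq_ediv_of_pos (by omega)
    omega

def solution_alt (n : Int) : String := altLoop n ""

-- ===== PRECONDITION & SPEC =====
def Spec_solution (n : Int) (out : String) : Prop := out = solution_alt n
instance (n : Int) (out : String) : Decidable (Spec_solution n out) := by unfold Spec_solution; infer_instance

-- ===== CLAIM (what is proved, stated in full; the proofs are below) =====
def Claim_equal_solution : Prop := ∀ (n : Int), Dom_solution n → Spec_solution n (solution n)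

-- ===== LEMMAS AND PROOFS =====

-- canonical MSB digit extraction (model of A's second loop), over Nat, as a char list
def gM : Nat → Nat → List Char
  | 0, _ => []
  | c + 1, m =>
      if m > 2 * 3 ^ c then '4' :: gM c (m - 2 * 3 ^ c)
      else if m > 3 ^ c then '2' :: gM c (m - 3 ^ c)
      else '1' :: gM c m

-- canonical LSB divmod-with-borrow (model of B's loop), over Nat
def fM (n : Nat) : List Char :=
  if n = 0 then []
  else if n % 3 = 0 then fM (n / 3 - 1) ++ ['4']
  else fM (n / 3) ++ [if n % 3 = 1 then '1' else '2']
termination_by n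
decreasing_by all_goals omega

-- model of A's first loop (unfueled; the real loop always breaks within its range(n) fuel)
def lM (c m : Nat) : Nat × Nat :=
  if m > 3 ^ (c + 1) then lM (c + 1) (m - 3 ^ (c + 1)) else (c + 1, m)
termination_by m
decreasing_by have : (3:Nat) ≤ 3 ^ (c+1) := Nat.le_self_pow (by omega) 3; omega

-- s3 c = 3 + 3^2 + … + 3^c
def s3 : Nat → Nat
  | 0 => 0
  | c + 1 => 3 * s3 c + 3

lemma s3_succ (c : Nat) : s3 (c + 1) = s3 c + 3 ^ (c + 1) := by
  induction c with
  | zero => simp [s3]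
  | succ c ih =>
      have h1 : s3 (c + 1 + 1) = 3 * s3 (c + 1) + 3 := rfl
      have h2 : s3 (c + 1) = 3 * s3 c + 3 := rfl
      have h3 : (3:Nat) ^ (c + 1 + 1) = 3 * 3 ^ (c + 1) := by ring
      omega

-- A's fueled loop equals the model, on positive Nat inputs with enough fuel
lemma solnLoop1_eq_lM : ∀ (f c : Nat) (m : Nat), 0 < m → m ≤ f →
    solnLoop1 f c (m : Int) = ((lM c m).1, ((lM c m).2 : Int)) := by
  intro f
  induction f with
  | zero => intro c m hm hf; omega
  | succ f ih =>
      intro c m hm hf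
      rw [solnLoop1, lM]
      have h3 : (3:Nat) ≤ 3 ^ (c+1) := Nat.le_self_pow (by omega) 3
      by_cases h : m > 3 ^ (c + 1)
      · have h' : (m : Int) > 3 ^ (c + 1) := by exact_mod_cast (Nat.cast_lt.mpr h : ((3:Nat)^(c+1) : Int) < m)
        rw [if_pos h', if_pos h]
        have e : ((m : Int) - 3 ^ (c+1)) = ((m - 3 ^ (c+1) : Nat) : Int) := by
          rw [Nat.cast_sub (le_of_lt h)]; push_cast; ring
        rw [e, ih (c+1) (m - 3 ^ (c+1)) (by omega) (by omega)]
      · have h' : ¬ (m : Int) > 3 ^ (c + 1) := by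
          intro hgt
          exact h (by exact_mod_cast (by exact_mod_cast hgt : ((3:Nat)^(c+1) : Int) < m))
        rw [if_neg h', if_neg h]

-- model-loop invariant: from state (c, m) it returns (c', r) with c < c', 0 < r ≤ 3^c',
-- and the absolute value is preserved: s3 c + m = s3 (c'-1) + r
lemma lM_spec : ∀ (m c : Nat), 0 < m →
    c < (lM c m).1 ∧ 0 < (lM c m).2 ∧ (lM c m).2 ≤ 3 ^ (lM c m).1 ∧
      s3 c + m = s3 ((lM c m).1 - 1) + (lM c m).2 := by
  intro m
  induction m using Nat.strong_induction_on with
  | _ m ih =>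
      intro c hm
      rw [lM]
      by_cases h : m > 3 ^ (c + 1)
      · have h3 : (3:Nat) ≤ 3 ^ (c+1) := Nat.le_self_pow (by omega) 3
        rw [if_pos h]
        have hspec := ih (m - 3 ^ (c+1)) (by omega) (c + 1) (by omega)
        refine ⟨by omega, hspec.2.1, hspec.2.2.1, ?_⟩
        have h4 := hspec.2.2.2
        rw [s3_succ] at h4
        omega
      · rw [if_neg h]
        exact ⟨by omega, hm, by simpa using by omega, by simp⟩

-- appending one character commutes with String.ofList
lemma ofList_snoc_append (l : List Char) (ch : Char) (acc : String) :
    String.ofList (l ++ [ch]) ++ acc = String.ofList l ++ (String.ofList [ch] ++ acc) := by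
  apply String.toList_inj.mp
  simp [String.toList_append, String.toList_ofList]

-- A's second loop (with accumulator, over Int) equals the Nat model gM
lemma solnLoop2_eq_gM : ∀ (c : Nat) (m : Nat) (acc : String),
    solnLoop2 c (m : Int) acc = acc ++ String.ofList (gM c m) := by
  intro c
  induction c with
  | zero =>
      intro m acc
      apply String.toList_inj.mp
      simp [solnLoop2, gM]
  | succ c ih =>
      intro m acc
      rw [solnLoop2, gM]
      by_cases h1 : m > 2 * 3 ^ c
      · have h1' : (m : Int) > 3 ^ c * 2 := by
          exact_mod_cast (by exact_mod_cast (by omega : 3 ^ c * 2 < m) : ((3^c*2 : Nat) : Int) < m)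
        rw [if_pos h1', if_pos h1]
        have e : ((m : Int) - 3 ^ c * 2) = ((m - 2 * 3 ^ c : Nat) : Int) := by
          rw [Nat.cast_sub (by omega : 2 * 3 ^ c ≤ m)]; push_cast; ring
        rw [e, ih]
        apply String.toList_inj.mp
        simp [String.toList_append, String.toList_ofList]
      · have h1' : ¬ (m : Int) > 3 ^ c * 2 := by
          intro hgt
          have : ((3^c*2 : Nat) : Int) < m := by exact_mod_cast hgt
          omega
        rw [if_neg h1', if_neg h1]
        by_cases h2 : m > 3 ^ c
        · have h2' : (m : Int) > 3 ^ c := by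
            exact_mod_cast (Nat.cast_lt.mpr h2 : ((3:Nat)^c : Int) < m)
          rw [if_pos h2', if_pos h2]
          have e : ((m : Int) - 3 ^ c) = ((m - 3 ^ c : Nat) : Int) := by
            rw [Nat.cast_sub (le_of_lt h2)]; push_cast; ring
          rw [e, ih]
          apply String.toList_inj.mp
          simp [String.toList_append, String.toList_ofList]
        · have h2' : ¬ (m : Int) > 3 ^ c := by
            intro hgt
            exact h2 (by exact_mod_cast (by exact_mod_cast hgt : ((3:Nat)^c : Int) < m))
          rw [if_neg h2', if_neg h2, ih]
          apply String.toList_inj.mp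
          simp [String.toList_append, String.toList_ofList]

-- last digit of the block-relative value m
def lastChar (m : Nat) : Char := if m % 3 = 0 then '4' else if m % 3 = 1 then '1' else '2'

-- peel the LAST digit off gM: the leading digits are those of (m+2)/3 one level down
lemma gM_snoc : ∀ (c m : Nat), 0 < m → m ≤ 3 ^ (c + 1) →
    gM (c + 1) m = gM c ((m + 2) / 3) ++ [lastChar m] := by
  intro c
  induction c with
  | zero =>
      intro m h1 h2
      norm_num at h2
      interval_cases m <;> simp [gM, lastChar]
  | succ c ih =>
      intro m h1 h2
      have hp : (3:Nat) ^ (c + 1 + 1) = 3 * 3 ^ (c + 1) := by ring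
      have hq : (3:Nat) ^ (c + 1) = 3 * 3 ^ c := by ring
      rw [gM]
      by_cases hA : m > 2 * 3 ^ (c + 1)
      · rw [if_pos hA]
        rw [ih (m - 2 * 3 ^ (c+1)) (by omega) (by omega)]
        have e1 : (m - 2 * 3 ^ (c+1) + 2) / 3 = (m + 2) / 3 - 2 * 3 ^ c := by omega
        have e2 : lastChar (m - 2 * 3 ^ (c+1)) = lastChar m := by
          unfold lastChar
          have hmod : (m - 2 * 3 ^ (c+1)) % 3 = m % 3 := by omega
          rw [hmod]
        rw [e1, e2]
        have hB : (m + 2) / 3 > 2 * 3 ^ c := by omega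
        rw [gM, if_pos hB]
        simp
      · rw [if_neg hA]
        by_cases hC : m > 3 ^ (c + 1)
        · rw [if_pos hC]
          rw [ih (m - 3 ^ (c+1)) (by omega) (by omega)]
          have e1 : (m - 3 ^ (c+1) + 2) / 3 = (m + 2) / 3 - 3 ^ c := by omega
          have e2 : lastChar (m - 3 ^ (c+1)) = lastChar m := by
            unfold lastChar
            have hmod : (m - 3 ^ (c+1)) % 3 = m % 3 := by omega
            rw [hmod]
          rw [e1, e2]
          have hB1 : ¬ (m + 2) / 3 > 2 * 3 ^ c := by omega
          have hB2 : (m + 2) / 3 > 3 ^ c := by omega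
          rw [gM, if_neg hB1, if_pos hB2]
          simp
        · rw [if_neg hC]
          rw [ih m h1 (by omega)]
          have hB1 : ¬ (m + 2) / 3 > 2 * 3 ^ c := by omega
          have hB2 : ¬ (m + 2) / 3 > 3 ^ c := by omega
          rw [gM, if_neg hB1, if_neg hB2]
          simp

-- main bridge: A's greedy block digits of m = B's divmod digits of the absolute value s3 c + m
lemma gM_eq_fM : ∀ (c m : Nat), 0 < m → m ≤ 3 ^ (c + 1) →
    gM (c + 1) m = fM (s3 c + m) := by
  intro c
  induction c with
  | zero =>
      intro m h1 h2
      norm_num at h2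
      interval_cases m <;> simp [gM, fM, s3]
  | succ c ih =>
      intro m h1 h2
      have hs : s3 (c + 1) = 3 * s3 c + 3 := rfl
      have hp : (3:Nat) ^ (c + 1 + 1) = 3 * 3 ^ (c + 1) := by ring
      rw [gM_snoc (c+1) m h1 h2]
      rw [ih ((m + 2) / 3) (by omega) (by omega)]
      have hN : ¬ (s3 (c+1) + m = 0) := by omega
      conv_rhs => rw [fM]
      rw [if_neg hN]
      by_cases h0 : m % 3 = 0
      · rw [if_pos (by omega : (s3 (c+1) + m) % 3 = 0)]
        have e : (s3 (c+1) + m) / 3 - 1 = s3 c + (m + 2) / 3 := by omega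
        rw [e]
        unfold lastChar
        rw [if_pos h0]
      · rw [if_neg (by omega : ¬ (s3 (c+1) + m) % 3 = 0)]
        have e : (s3 (c+1) + m) / 3 = s3 c + (m + 2) / 3 := by omega
        rw [e]
        unfold lastChar
        rw [if_neg h0]
        by_cases h1' : m % 3 = 1
        · rw [if_pos h1', if_pos (by omega : (s3 (c+1) + m) % 3 = 1)]
        · rw [if_neg h1', if_neg (by omega : ¬ (s3 (c+1) + m) % 3 = 1)]

-- B's loop equals the Nat model fM
lemma altLoop_eq_fM : ∀ (k : Nat) (n : Int), n.toNat = k → ∀ (acc : String),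
    altLoop n acc = String.ofList (fM n.toNat) ++ acc := by
  intro k
  induction k using Nat.strong_induction_on with
  | _ k ih =>
      intro n hk acc
      rw [altLoop]
      by_cases hn : 0 < n
      · rw [if_pos hn]
        have hq : PySem.Int.floordiv n 3 = ((n.toNat / 3 : Nat) : Int) := by
          rw [PySem.Int.floordiv_eq_ediv_of_pos (by omega)]; omega
        have hr : PySem.Int.mod n 3 = ((n.toNat % 3 : Nat) : Int) := by
          rw [PySem.Int.mod_eq_emod_of_pos (by omega)]; omega
        by_cases h0 : n.toNat % 3 = 0
        · rw [if_pos (by rw [hr, h0]; rfl)]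
          have e1 : (PySem.Int.floordiv n 3 - 1).toNat = n.toNat / 3 - 1 := by
            rw [hq]; omega
          rw [ih (n.toNat / 3 - 1) (by omega) _ e1]
          conv_rhs => rw [fM]
          rw [if_neg (by omega : ¬ n.toNat = 0), if_pos h0, e1]
          rw [show ("4" : String) = String.ofList ['4'] from by decide]
          exact (ofList_snoc_append _ _ _).symm
        · rw [if_neg (by rw [hr]; intro hc; exact h0 (by exact_mod_cast hc))]
          have e1 : (PySem.Int.floordiv n 3).toNat = n.toNat / 3 := by
            rw [hq]; omega
          rw [ih (n.toNat / 3) (by omega) _ e1]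
          conv_rhs => rw [fM]
          rw [if_neg (by omega : ¬ n.toNat = 0), if_neg h0, e1]
          by_cases h1 : n.toNat % 3 = 1
          · rw [if_pos h1]
            rw [show PySem.Int.mod n 3 = (1 : Int) from by rw [hr, h1]; rfl]
            rw [show PySem.Int.toStr 1 = String.ofList ['1'] from by decide]
            exact (ofList_snoc_append _ _ _).symm
          · rw [if_neg h1]
            rw [show PySem.Int.mod n 3 = (2 : Int) from by rw [hr]; omega]
            rw [show PySem.Int.toStr 2 = String.ofList ['2'] from by decide]
            exact (ofList_snoc_append _ _ _).symm
      · rw [if_neg hn]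
        have h0 : n.toNat = 0 := by omega
        rw [h0, fM]
        apply String.toList_inj.mp
        simp

-- ===== VERDICT (by name: the statement is the Claim_ definition above) =====
theorem solution_spec : Claim_equal_solution := by
  intro n _
  unfold Spec_solution solution solution_alt
  rw [altLoop_eq_fM n.toNat n rfl ""]
  by_cases hn : 0 < n
  · have hm : ((n.toNat : Nat) : Int) = n := by omega
    have hmpos : 0 < n.toNat := by omega
    have h1 : solnLoop1 n.toNat 0 n = ((lM 0 n.toNat).1, ((lM 0 n.toNat).2 : Int)) := by
      conv_lhs => rw [← hm]
      rw [Int.toNat_natCast]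
      exact solnLoop1_eq_lM n.toNat 0 n.toNat hmpos le_rfl
    rw [h1]
    obtain ⟨hc, hr0, hr3, habs⟩ := lM_spec n.toNat 0 hmpos
    rw [solnLoop2_eq_gM]
    have hgf : gM (lM 0 n.toNat).1 (lM 0 n.toNat).2 = fM n.toNat := by
      have e : (lM 0 n.toNat).1 = ((lM 0 n.toNat).1 - 1) + 1 := by omega
      rw [e, gM_eq_fM ((lM 0 n.toNat).1 - 1) (lM 0 n.toNat).2 hr0 (by rw [← e]; exact hr3)]
      congr 1
      simp [s3] at habs
      omega
    rw [hgf]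
    apply String.toList_inj.mp
    simp [String.toList_ofList]
  · have h0 : n.toNat = 0 := by omega
    rw [h0]
    show solnLoop2 (solnLoop1 0 0 n).1 (solnLoop1 0 0 n).2 "" = _
    rw [show solnLoop1 0 0 n = (0, n) from rfl, fM]
    apply String.toList_inj.mp
    simp [solnLoop2]
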